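-- pv_equiv track=rewrite | github.com/ravynsoft/ravynos | CoreServices/WindowServer/libinput/tools/libinput-measure-touchpad-size.py | dmi_modalias_match
-- ===== SOURCE A (Python) =====
-- def dmi_modalias_match(modalias):
--     modalias = modalias.split(":")
--     dmi = {"svn": None, "pvr": None, "pn": None}
--     for m in modalias:
--         for key in dmi:
--             if m.startswith(key):
--                 dmi[key] = m[len(key) :]
--
--     # Based on the current 60-evdev.hwdb, Lenovo uses pvr and everyone else
--     # uses pn to provide a human-identifiable match
--     if dmi["svn"] == "LENOVO":
--         return "dmi:*svn{}:*pvr{}*".format(dmi["svn"], dmi["pvr"])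
--     else:
--         return "dmi:*svn{}:*pn{}*".format(dmi["svn"], dmi["pn"])
-- ===== SOURCE B (Python) =====
-- def dmi_modalias_match(modalias):
--     segments = modalias.split(":")
--     segments.reverse()
--
--     def last(key):
--         for seg in segments:
--             if seg.startswith(key):
--                 return seg[len(key):]
--         return None
--
--     svn = last("svn")
--     if svn == "LENOVO":
--         return "dmi:*svn{}:*pvr{}*".format(svn, last("pvr"))
--     return "dmi:*svn{}:*pn{}*".format(svn, last("pn"))
-- ===== Notes on version B (the rewrite author's own statement) =====
-- stated objective: alternative
-- what changed: Replaces the single left-to-right pass that fills a three-key dict (last write wins) with per-field scans over the reversed segment list that return the first (i.e. last-in-order) matching suffix.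
import Mathlib
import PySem

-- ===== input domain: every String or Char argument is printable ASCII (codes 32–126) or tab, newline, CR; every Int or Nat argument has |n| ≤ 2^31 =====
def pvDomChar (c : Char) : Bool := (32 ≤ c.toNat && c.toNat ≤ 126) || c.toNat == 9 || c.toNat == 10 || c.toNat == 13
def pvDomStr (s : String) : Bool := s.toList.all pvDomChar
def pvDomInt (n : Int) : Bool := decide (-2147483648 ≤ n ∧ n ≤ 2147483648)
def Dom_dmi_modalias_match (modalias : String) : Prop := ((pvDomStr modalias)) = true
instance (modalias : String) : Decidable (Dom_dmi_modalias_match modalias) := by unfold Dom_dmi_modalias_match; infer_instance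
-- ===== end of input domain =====

-- B replaces A's one-pass dict fill (last write wins) by per-field reversed scans (first match wins); same output, similar cost.

-- models Python str.format rendering of an Optional[str] argument ("None" for None)
def pvFmtOpt (o : Option (List Char)) : List Char :=
  match o with
  | none => "None".toList
  | some cs => cs

-- ===== PORT A =====
def dmi_modalias_match (modalias : String) : String :=
  let parts : List (List Char) := PySem.Chars.splitOn modalias.toList ":".toList
  let dmi0 : PySem.Dict (List Char) (Option (List Char)) :=
    PySem.Dict.ofList [("svn".toList, none), ("pvr".toList, none), ("pn".toList, none)]
  let dmi := parts.foldl (fun d m =>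
    (d.keys).foldl (fun d key =>
      if PySem.Chars.startswith m key then
        d.insert key (some (PySem.Chars.slice m (some (PySem.Chars.len key : Int)) none))
      else d) d) dmi0
  if dmi.getD "svn".toList none == some "LENOVO".toList then
    String.ofList ("dmi:*svn".toList ++ pvFmtOpt (dmi.getD "svn".toList none) ++ ":*pvr".toList
      ++ pvFmtOpt (dmi.getD "pvr".toList none) ++ "*".toList)
  else
    String.ofList ("dmi:*svn".toList ++ pvFmtOpt (dmi.getD "svn".toList none) ++ ":*pn".toList
      ++ pvFmtOpt (dmi.getD "pn".toList none) ++ "*".toList)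

-- ===== PORT B =====
-- B's helper `last`: scan the (already reversed) segment list, return the suffix of the first match
def pvLastScan (segs : List (List Char)) (key : List Char) : Option (List Char) :=
  match segs with
  | [] => none
  | seg :: rest =>
    if PySem.Chars.startswith seg key then
      some (PySem.Chars.slice seg (some (PySem.Chars.len key : Int)) none)
    else pvLastScan rest key

def dmi_modalias_match_alt (modalias : String) : String :=
  let segments : List (List Char) := (PySem.Chars.splitOn modalias.toList ":".toList).reverse
  let svn := pvLastScan segments "svn".toList
  if svn == some "LENOVO".toList then
    String.ofList ("dmi:*svn".toList ++ pvFmtOpt svn ++ ":*pvr".toList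
      ++ pvFmtOpt (pvLastScan segments "pvr".toList) ++ "*".toList)
  else
    String.ofList ("dmi:*svn".toList ++ pvFmtOpt svn ++ ":*pn".toList
      ++ pvFmtOpt (pvLastScan segments "pn".toList) ++ "*".toList)

-- ===== PRECONDITION & SPEC =====
def Spec_dmi_modalias_match (modalias : String) (out : String) : Prop := out = dmi_modalias_match_alt modalias
instance (modalias : String) (out : String) : Decidable (Spec_dmi_modalias_match modalias out) := by unfold Spec_dmi_modalias_match; infer_instance

-- ===== CLAIM (what is proved, stated in full; the proofs are below) =====
def Claim_equal_dmi_modalias_match : Prop := ∀ (modalias : String), Dom_dmi_modalias_match modalias → Spec_dmi_modalias_match modalias (dmi_modalias_match modalias)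

-- ===== LEMMAS AND PROOFS =====

-- one inner key-loop step of A on the three-key dict, written field-wise
def pvUpd (key : List Char) (v : Option (List Char)) (m : List Char) : Option (List Char) :=
  if PySem.Chars.startswith m key then
    some (PySem.Chars.slice m (some (PySem.Chars.len key : Int)) none)
  else v

lemma pvStep_eq (a b c : Option (List Char)) (m : List Char) :
    ((PySem.Dict.mk [("svn".toList, a), ("pvr".toList, b), ("pn".toList, c)]).keys).foldl
      (fun d key =>
        if PySem.Chars.startswith m key then
          d.insert key (some (PySem.Chars.slice m (some (PySem.Chars.len key : Int)) none))
        else d)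
      (PySem.Dict.mk [("svn".toList, a), ("pvr".toList, b), ("pn".toList, c)])
    = PySem.Dict.mk [("svn".toList, pvUpd "svn".toList a m),
                     ("pvr".toList, pvUpd "pvr".toList b m),
                     ("pn".toList, pvUpd "pn".toList c m)] := by
  simp only [PySem.Dict.keys, List.map, List.foldl, pvUpd]
  split_ifs <;> simp [PySem.Dict.insert]

lemma pvFold_eq (parts : List (List Char)) (a b c : Option (List Char)) :
    parts.foldl (fun d m =>
      (d.keys).foldl (fun d key =>
        if PySem.Chars.startswith m key then
          d.insert key (some (PySem.Chars.slice m (some (PySem.Chars.len key : Int)) none))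
        else d) d)
      (PySem.Dict.mk [("svn".toList, a), ("pvr".toList, b), ("pn".toList, c)])
    = PySem.Dict.mk [("svn".toList, parts.foldl (pvUpd "svn".toList) a),
                     ("pvr".toList, parts.foldl (pvUpd "pvr".toList) b),
                     ("pn".toList, parts.foldl (pvUpd "pn".toList) c)] := by
  induction parts generalizing a b c with
  | nil => rfl
  | cons m rest ih =>
    simp only [List.foldl]
    rw [pvStep_eq, ih]

lemma pvLastScan_append (x y : List (List Char)) (key : List Char) :
    pvLastScan (x ++ y) key = (pvLastScan x key).or (pvLastScan y key) := by
  induction x with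
  | nil => rfl
  | cons seg rest ih =>
    simp only [List.cons_append, pvLastScan]
    split_ifs <;> simp [ih]

lemma pvFoldl_upd_eq_lastScan (parts : List (List Char)) (key : List Char) (v : Option (List Char)) :
    parts.foldl (pvUpd key) v = (pvLastScan parts.reverse key).or v := by
  induction parts generalizing v with
  | nil => rfl
  | cons m rest ih =>
    simp only [List.foldl, List.reverse_cons, pvLastScan_append, ih]
    have hm : pvLastScan [m] key = pvUpd key none m := by
      simp only [pvLastScan, pvUpd]
    rw [hm, Option.or_assoc]
    congr 1
    cases v <;> simp [pvUpd, Option.or] <;> split_ifs <;> rfl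

lemma pvValue_eq (parts : List (List Char)) (key : List Char) :
    parts.foldl (pvUpd key) none = pvLastScan parts.reverse key := by
  rw [pvFoldl_upd_eq_lastScan, Option.or_none]

-- ===== VERDICT (by name: the statement is the Claim_ definition above) =====
theorem dmi_modalias_match_spec : Claim_equal_dmi_modalias_match := by
  intro modalias _
  have h0 : (PySem.Dict.ofList [("svn".toList, (none : Option (List Char))), ("pvr".toList, none), ("pn".toList, none)])
      = PySem.Dict.mk [("svn".toList, none), ("pvr".toList, none), ("pn".toList, none)] := by rfl
  simp only [Spec_dmi_modalias_match, dmi_modalias_match, dmi_modalias_match_alt, h0]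
  rw [pvFold_eq]
  simp only [PySem.Dict.getD, PySem.Dict.get?_mk_cons, pvValue_eq]
  simp
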